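-- pv_equiv track=rewrite | github.com/xco2/smolvlm2-500M-illustration-description | train_grpo.py | repeat_penalty
-- ===== SOURCE A (Python) =====
-- def check_repeat(text: str) -> bool:
--     # 去除空白符
--     # text = content.replace('\n', '').replace(' ', '')
--     # 设定最小重复片段长度（比如15个字），和最大允许重复次数
--     max_len = 40
--     max_repeat = 2
--     n = len(text)
--     # 只检测较长文本
--     if n < max_len * 2:
--         return False
--     # 用滑动窗口检测重复片段
--     res = False
--     for size in range(max_len, max_len - 15, -1):
--         substr_count = {}
--         for i in range(n - size + 1):
--             substr = text[i:i + size]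
--             if substr in substr_count:
--                 substr_count[substr] += 1
--             else:
--                 substr_count[substr] = 1
--             if substr_count[substr] >= max_repeat:
--                 return True
--     return False
--
-- def repeat_penalty(prompts, completions, **reward_kwargs):
--     """
--     重复惩罚
--     :param prompts: 样本
--     :param completions: 模型输出
--     :param reward_kwargs: 其他参数
--     :return: 惩罚
--     """
--     penalty = []
--     for completion in completions:
--         if check_repeat(completion):
--             penalty.append(-1)
--         else:
--             penalty.append(0)
--
--     return penalty
-- ===== SOURCE B (Python) =====
-- def check_repeat(text: str) -> bool:
--     n = len(text)
--     # same guard as the original: only texts of length >= 80 are checked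
--     if n < 80:
--         return False
--     # a repeat of any length 26..40 implies a repeat of its length-26 prefix,
--     # so one pass at window size 26 with a seen-set is enough
--     seen = set()
--     for i in range(n - 26 + 1):
--         sub = text[i:i + 26]
--         if sub in seen:
--             return True
--         seen.add(sub)
--     return False
--
--
-- def repeat_penalty(prompts, completions, **reward_kwargs):
--     return [-1 if check_repeat(c) else 0 for c in completions]
-- ===== Notes on version B (the rewrite author's own statement) =====
-- stated objective: simpler
-- what changed: check_repeat's 15 sliding-window passes (sizes 40..26, each with a fresh substring-count dict) are replaced by a single pass at window size 26 with a seen-set, since a repeat at any size 26..40 implies its length-26 prefix repeats; repeat_penalty itself becomes a list comprehension.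
import Mathlib
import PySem

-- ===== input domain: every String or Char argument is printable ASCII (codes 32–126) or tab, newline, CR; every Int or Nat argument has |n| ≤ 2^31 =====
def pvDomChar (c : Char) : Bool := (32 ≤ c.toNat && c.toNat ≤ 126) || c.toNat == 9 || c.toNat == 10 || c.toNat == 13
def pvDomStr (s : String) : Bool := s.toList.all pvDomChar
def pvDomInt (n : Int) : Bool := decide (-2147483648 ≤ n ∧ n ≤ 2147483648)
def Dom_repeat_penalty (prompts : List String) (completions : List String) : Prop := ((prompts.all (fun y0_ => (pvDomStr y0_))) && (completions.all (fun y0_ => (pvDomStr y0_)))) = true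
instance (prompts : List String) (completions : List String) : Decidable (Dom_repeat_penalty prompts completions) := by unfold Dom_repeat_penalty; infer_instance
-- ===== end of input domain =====

-- B replaces A's 15 nested sliding-window passes (sizes 40..26, per-size count dict) by a single
-- pass at window size 26 with a seen-set: a repeat at any size 26..40 implies a length-26 repeat.

-- ===== PORT A =====
-- inner loop of check_repeat: for i in range(n - size + 1), counting substrings; early return True
def checkRepeatInnerA (text : String) (size : Int) (is : List Int) (d : PySem.Dict String Int) : Bool :=
  match is with
  | [] => false
  | i :: rest =>
    let substr := PySem.Str.slice text (some i) (some (i + size))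
    let d' := if d.contains substr then d.insert substr (d.getD substr 0 + 1) else d.insert substr 1
    if 2 ≤ d'.getD substr 0 then true
    else checkRepeatInnerA text size rest d'

-- outer loop: for size in range(max_len, max_len - 15, -1)
def checkRepeatOuterA (text : String) (sizes : List Int) : Bool :=
  match sizes with
  | [] => false
  | size :: rest =>
    if checkRepeatInnerA text size (PySem.List.pyRange 0 (PySem.Str.len text - size + 1) 1) PySem.Dict.empty then
      true
    else checkRepeatOuterA text rest

def check_repeat (text : String) : Bool :=
  if PySem.Str.len text < 40 * 2 then false
  else checkRepeatOuterA text (PySem.List.pyRange 40 (40 - 15) (-1))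

def repeat_penalty (prompts : List String) (completions : List String) : List Int :=
  completions.foldl (fun penalty completion => penalty ++ [if check_repeat completion then -1 else 0]) []

-- ===== PORT B =====
-- single pass at window size 26 with a seen-set; early return True on first repeat
def checkRepeatInnerB (text : String) (is : List Int) (seen : PySem.Set String) : Bool :=
  match is with
  | [] => false
  | i :: rest =>
    let sub := PySem.Str.slice text (some i) (some (i + 26))
    if seen.contains sub then true
    else checkRepeatInnerB text rest (seen.add sub)

def check_repeat_alt (text : String) : Bool :=
  if PySem.Str.len text < 80 then false
  else checkRepeatInnerB text (PySem.List.pyRange 0 (PySem.Str.len text - 26 + 1) 1) PySem.Set.empty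

def repeat_penalty_alt (prompts : List String) (completions : List String) : List Int :=
  completions.map (fun c => if check_repeat_alt c then -1 else 0)

-- ===== PRECONDITION & SPEC =====
def Spec_repeat_penalty (prompts : List String) (completions : List String) (out : List Int) : Prop := out = repeat_penalty_alt prompts completions
instance (prompts : List String) (completions : List String) (out : List Int) : Decidable (Spec_repeat_penalty prompts completions out) := by unfold Spec_repeat_penalty; infer_instance

-- ===== CLAIM (what is proved, stated in full; the proofs are below) =====
def Claim_equal_repeat_penalty : Prop := ∀ (prompts : List String) (completions : List String), Dom_repeat_penalty prompts completions → Spec_repeat_penalty prompts completions (repeat_penalty prompts completions)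

-- ===== LEMMAS AND PROOFS =====

-- the slice both programs take at position i with window size s
def slcAt (text : String) (i s : Int) : String := PySem.Str.slice text (some i) (some (i + s))

-- abstract duplicate scan over a list of strings with a seen list
def scanDup (seen : List String) : List String → Bool
  | [] => false
  | x :: r => if seen.contains x then true else scanDup (x :: seen) r

theorem scanDup_congr (ss : List String) : ∀ s1 s2 : List String, (∀ x, x ∈ s1 ↔ x ∈ s2) →
    scanDup s1 ss = scanDup s2 ss := by
  induction ss with
  | nil => intro _ _ _; rfl
  | cons x r ih =>
    intro s1 s2 h
    simp only [scanDup, List.contains_eq_mem]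
    by_cases hx : x ∈ s1
    · simp [hx, (h x).mp hx]
    · have hx2 : x ∉ s2 := fun hc => hx ((h x).mpr hc)
      simp only [hx, hx2, decide_false, Bool.false_eq_true, if_false]
      exact ih _ _ (by intro y; simp [h y])

theorem scanDup_iff (ss : List String) : ∀ seen : List String,
    (scanDup seen ss = true ↔ ¬ ss.Nodup ∨ ∃ x ∈ ss, x ∈ seen) := by
  induction ss with
  | nil => intro seen; simp [scanDup]
  | cons x r ih =>
    intro seen
    simp only [scanDup, List.contains_eq_mem]
    by_cases hx : x ∈ seen
    · simp [hx]
    · simp only [hx, decide_false, Bool.false_eq_true, if_false, ih (x :: seen),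
        List.nodup_cons, List.mem_cons]
      constructor
      · rintro (hnd | ⟨y, hy, (rfl | hys)⟩)
        · tauto
        · exact Or.inl (fun ⟨hxr, _⟩ => hxr hy)
        · exact Or.inr ⟨y, Or.inr hy, hys⟩
      · rintro (hnd | ⟨y, (rfl | hyr), hys⟩)
        · by_cases hxr : x ∈ r
          · exact Or.inr ⟨x, hxr, Or.inl rfl⟩
          · exact Or.inl (fun h => hnd ⟨hxr, h⟩)
        · exact hx.elim hys
        · exact Or.inr ⟨y, hyr, Or.inr hys⟩

-- A's inner loop is the abstract scan, as long as every stored count is 1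
theorem innerA_eq_scanDup (text : String) (s : Int) : ∀ (is : List Int) (d : PySem.Dict String Int),
    (∀ k v, d.get? k = some v → v = 1) →
    checkRepeatInnerA text s is d = scanDup d.keys (is.map (fun i => slcAt text i s)) := by
  intro is
  induction is with
  | nil => intro d _; rfl
  | cons i rest ih =>
    intro d hd
    simp only [checkRepeatInnerA, List.map_cons, scanDup, slcAt]
    set substr := PySem.Str.slice text (some i) (some (i + s)) with hsub
    by_cases hc : d.contains substr = true
    · -- seen before: stored count is 1, new count is 2, both sides return true
      have hk : substr ∈ d.keys := (PySem.Dict.contains_iff_mem_keys d substr).mp hc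
      have hget : (d.get? substr).isSome := by rw [← PySem.Dict.contains_eq_isSome_get?]; exact hc
      obtain ⟨v, hv⟩ := Option.isSome_iff_exists.mp hget
      have hgetD : d.getD substr 0 = 1 := by
        rw [PySem.Dict.getD_eq_get?_getD, hv, hd _ _ hv]; rfl
      have hkc : d.keys.contains substr = true := by
        rw [List.contains_eq_mem]; exact decide_eq_true hk
      simp [hc, PySem.Dict.getD_insert_self, hgetD]
      exact Or.inl hk
    · -- fresh: inserted with count 1, recurse with the extended dict / seen list
      have hc' : d.contains substr = false := by simpa using hc
      have hk : substr ∉ d.keys := fun h => hc ((PySem.Dict.contains_iff_mem_keys d substr).mpr h)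
      have hinv : ∀ k v, ((d.insert substr 1).get? k = some v → v = 1) := by
        intro k v hkv
        rw [PySem.Dict.get?_insert] at hkv
        split_ifs at hkv with h
        · exact (Option.some_inj.mp hkv).symm
        · exact hd _ _ hkv
      have hkc : d.keys.contains substr = false := by
        rw [List.contains_eq_mem]; simpa using hk
      simp only [hc', Bool.false_eq_true, if_false, hkc]
      rw [PySem.Dict.getD_insert_self, if_neg (by norm_num : ¬ ((2:Int) ≤ 1)),
        ih _ hinv, PySem.Dict.keys_insert_of_not_contains _ _ hc']
      simp only [slcAt]
      apply scanDup_congr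
      intro y; simp [or_comm]

-- B's inner loop is the abstract scan
theorem innerB_eq_scanDup (text : String) : ∀ (is : List Int) (seen : PySem.Set String),
    seen.Nodup →
    checkRepeatInnerB text is seen = scanDup seen (is.map (fun i => slcAt text i 26)) := by
  intro is
  induction is with
  | nil => intro _ _; rfl
  | cons i rest ih =>
    intro seen hnd
    simp only [checkRepeatInnerB, List.map_cons, scanDup, slcAt,
      PySem.Set.contains_eq_listContains]
    set sub := PySem.Str.slice text (some i) (some (i + 26)) with hsub
    by_cases hm : sub ∈ seen
    · rw [if_pos (by rw [List.contains_eq_mem]; exact decide_eq_true hm),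
        if_pos (by rw [List.contains_eq_mem]; exact decide_eq_true hm)]
    · rw [if_neg (by rw [List.contains_eq_mem]; simpa using hm),
        if_neg (by rw [List.contains_eq_mem]; simpa using hm),
        PySem.Set.add_of_not_mem hm,
        ih _ (by simp [List.nodup_append, hnd]; exact fun a ha h => hm (h ▸ ha))]
      simp only [slcAt]
      apply scanDup_congr
      intro y; simp [or_comm]

-- the list of windows of size s
def windows (text : String) (s : Int) : List String :=
  (PySem.List.pyRange 0 (PySem.Str.len text - s + 1) 1).map (fun i => slcAt text i s)

theorem innerA_iff_windows (text : String) (s : Int) :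
    (checkRepeatInnerA text s (PySem.List.pyRange 0 (PySem.Str.len text - s + 1) 1) PySem.Dict.empty = true
      ↔ ¬ (windows text s).Nodup) := by
  rw [innerA_eq_scanDup text s _ PySem.Dict.empty (by intro k v h; simp [PySem.Dict.get?_empty] at h)]
  rw [show (PySem.Dict.empty : PySem.Dict String Int).keys = [] from rfl]
  rw [scanDup_iff]
  simp [windows]

theorem innerB_iff_windows (text : String) :
    (checkRepeatInnerB text (PySem.List.pyRange 0 (PySem.Str.len text - 26 + 1) 1) PySem.Set.empty = true
      ↔ ¬ (windows text 26).Nodup) := by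
  rw [innerB_eq_scanDup text _ PySem.Set.empty (by simp [PySem.Set.empty])]
  rw [scanDup_iff]
  simp [windows, PySem.Set.empty]

theorem outerA_iff (text : String) : ∀ sizes : List Int,
    (checkRepeatOuterA text sizes = true ↔ ∃ s ∈ sizes,
      checkRepeatInnerA text s (PySem.List.pyRange 0 (PySem.Str.len text - s + 1) 1) PySem.Dict.empty = true) := by
  intro sizes
  induction sizes with
  | nil => simp [checkRepeatOuterA]
  | cons s rest ih =>
    simp only [checkRepeatOuterA]
    by_cases h : checkRepeatInnerA text s (PySem.List.pyRange 0 (PySem.Str.len text - s + 1) 1) PySem.Dict.empty = true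
    · rw [if_pos h]
      exact ⟨fun _ => ⟨s, List.mem_cons_self, h⟩, fun _ => rfl⟩
    · rw [if_neg h, ih]
      constructor
      · rintro ⟨t, ht, hh⟩; exact ⟨t, List.mem_cons_of_mem _ ht, hh⟩
      · rintro ⟨t, ht, hh⟩
        rcases List.mem_cons.mp ht with h1 | h2
        · exact absurd (h1 ▸ hh) h
        · exact ⟨t, h2, hh⟩

-- a duplicate pair of windows at size s (26 ≤ s ≤ 40) yields one at window size 26
theorem windows_dup_mono (text : String) (s : Int) (h26 : 26 ≤ s) (hs : s ≤ 40)
    (hn : 80 ≤ PySem.Str.len text) (h : ¬ (windows text s).Nodup) : ¬ (windows text 26).Nodup := by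
  set n : Int := PySem.Str.len text with hnd
  have hslc : ∀ (t : Int) (k : Nat), 0 ≤ t → slcAt text (k : Int) t
      = String.ofList (List.take t.toNat (List.drop k text.toList)) := by
    intro t k ht
    apply String.toList_inj.mp
    simp only [slcAt, PySem.Str.toList_slice, PySem.Chars.slice_eq_listSlice]
    rw [show ((k : Int) + t) = ((k : Int) + (t.toNat : Int)) by omega,
      PySem.List.slice_natCast_add]
    simp
  have hw : ∀ t : Int, 0 ≤ t → windows text t
      = (List.range (n - t + 1).toNat).map
          (fun k => String.ofList (List.take t.toNat (List.drop k text.toList))) := by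
    intro t ht
    simp only [windows, ← hnd, PySem.List.pyRange_one, List.map_map, Function.comp_def,
      Int.sub_zero, zero_add]
    exact List.map_congr_left (fun k _ => hslc t k ht)
  rw [hw s (by omega)] at h
  rw [hw 26 (by omega)]
  simp only [List.Nodup, List.pairwise_map, List.pairwise_iff_getElem, List.length_map,
    List.getElem_map, List.length_range, List.getElem_range] at h ⊢
  push_neg at h ⊢
  obtain ⟨i, j, hi, hj, hij, heq⟩ := h
  have hlist : List.take s.toNat (List.drop i text.toList)
      = List.take s.toNat (List.drop j text.toList) := by
    have := congrArg String.toList heq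
    simpa [String.toList_ofList] using this
  refine ⟨i, j, by omega, by omega, hij, ?_⟩
  congr 1
  have h1 : List.take (Int.toNat 26) (List.drop i text.toList)
      = List.take 26 (List.take s.toNat (List.drop i text.toList)) := by
    rw [List.take_take]; congr 1; omega
  have h2 : List.take (Int.toNat 26) (List.drop j text.toList)
      = List.take 26 (List.take s.toNat (List.drop j text.toList)) := by
    rw [List.take_take]; congr 1; omega
  rw [h1, h2, hlist]

theorem check_repeat_eq (text : String) : check_repeat text = check_repeat_alt text := by
  unfold check_repeat check_repeat_alt
  by_cases hn : PySem.Str.len text < 80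
  · rw [if_pos (by omega), if_pos hn]
  · push_neg at hn
    rw [if_neg (by omega), if_neg (by omega)]
    rw [Bool.eq_iff_iff, outerA_iff, innerB_iff_windows]
    constructor
    · rintro ⟨s, hs, hinner⟩
      rw [PySem.List.mem_pyRange_neg_one] at hs
      exact windows_dup_mono text s (by omega) (by omega) hn ((innerA_iff_windows text s).mp hinner)
    · intro h
      refine ⟨26, ?_, (innerA_iff_windows text 26).mpr h⟩
      rw [PySem.List.mem_pyRange_neg_one]; omega

theorem foldl_append_eq_map (f : String → Int) : ∀ (l : List String) (acc : List Int),
    l.foldl (fun pen c => pen ++ [f c]) acc = acc ++ l.map f := by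
  intro l
  induction l with
  | nil => simp
  | cons x r ih => intro acc; simp [ih, List.append_assoc]

-- ===== VERDICT (by name: the statement is the Claim_ definition above) =====
theorem repeat_penalty_spec : Claim_equal_repeat_penalty := by
  intro prompts completions _
  unfold Spec_repeat_penalty repeat_penalty repeat_penalty_alt
  rw [foldl_append_eq_map]
  simp only [List.nil_append]
  congr 1
  funext c
  rw [check_repeat_eq]
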